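-- pv_equiv track=rewrite | github.com/eoruadl/codingAlgorithm | Programmers/levelTest/과일장수.py | solution
-- ===== SOURCE A (Python) =====
-- def solution(k, m, score):
--     answer = 0
--     s_score = sorted(score, reverse=True)
--     box = []
--     for a in s_score:
--         box.append(a)
--         if len(box) == m:
--             answer += box[-1] * m
--             box = []
--     return answer
-- ===== SOURCE B (Python) =====
-- def solution(k, m, score):
--     if m <= 0:
--         return 0
--     s = sorted(score, reverse=True)
--     return m * sum(s[i * m - 1] for i in range(1, len(s) // m + 1))
-- ===== Notes on version B (the rewrite author's own statement) =====
-- stated objective: simpler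
-- what changed: Replaces the box-accumulation loop (append, length check, reset) with a direct closed-form sum m * sum(s[i*m-1] for complete groups i = 1..n//m) over the descending-sorted list.
import Mathlib
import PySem

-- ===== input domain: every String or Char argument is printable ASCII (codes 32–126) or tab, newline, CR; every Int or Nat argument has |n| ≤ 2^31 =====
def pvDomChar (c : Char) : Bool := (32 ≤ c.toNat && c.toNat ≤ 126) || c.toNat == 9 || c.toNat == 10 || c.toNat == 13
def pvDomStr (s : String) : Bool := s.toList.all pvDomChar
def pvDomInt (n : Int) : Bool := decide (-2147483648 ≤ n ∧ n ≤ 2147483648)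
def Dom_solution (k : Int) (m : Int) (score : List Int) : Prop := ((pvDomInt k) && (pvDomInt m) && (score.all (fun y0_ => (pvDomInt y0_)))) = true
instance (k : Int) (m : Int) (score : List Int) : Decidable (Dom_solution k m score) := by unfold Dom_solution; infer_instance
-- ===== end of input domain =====

-- B replaces A's box-accumulation loop with a closed-form sum over the group-minimum
-- indices of the descending-sorted list (same O(n log n) cost, simpler).

-- ===== PORT A =====
def solution (k : Int) (m : Int) (score : List Int) : Int :=
  let s_score := PySem.List.sorted score (fun x => x) true
  (s_score.foldl (fun (st : Int × List Int) a =>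
      let box := st.2 ++ [a]
      if (box.length : Int) = m then
        -- box[-1]: box = st.2 ++ [a] is nonempty, so pyGetD with default 0 is exact here
        (st.1 + PySem.List.pyGetD box (-1) 0 * m, ([] : List Int))
      else (st.1, box)) (0, ([] : List Int))).1

-- ===== PORT B =====
def solution_alt (k : Int) (m : Int) (score : List Int) : Int :=
  if m ≤ 0 then 0
  else
    let s := PySem.List.sorted score (fun x => x) true
    m * ((PySem.List.pyRange 1 (PySem.Int.floordiv (s.length : Int) m + 1) 1).map
          (fun i => PySem.List.pyGetD s (i * m - 1) 0)).sum

-- ===== PRECONDITION & SPEC =====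
def Spec_solution (k : Int) (m : Int) (score : List Int) (out : Int) : Prop := out = solution_alt k m score
instance (k : Int) (m : Int) (score : List Int) (out : Int) : Decidable (Spec_solution k m score out) := by unfold Spec_solution; infer_instance

-- ===== CLAIM (what is proved, stated in full; the proofs are below) =====
def Claim_equal_solution : Prop := ∀ (k : Int) (m : Int) (score : List Int), Dom_solution k m score → Spec_solution k m score (solution k m score)

-- ===== LEMMAS AND PROOFS =====

-- the per-element step of A's loop
def stepA (m : Int) (st : Int × List Int) (a : Int) : Int × List Int :=
  let box := st.2 ++ [a]
  if (box.length : Int) = m then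
    (st.1 + PySem.List.pyGetD box (-1) 0 * m, ([] : List Int))
  else (st.1, box)

-- spec of A's loop: `c` slots remain in the current box; on the m-th element add a*m
def gspec (mI : Int) (mn : Nat) : Nat → List Int → Int
  | _, [] => 0
  | c, a :: t => if c ≤ 1 then a * mI + gspec mI mn mn t else gspec mI mn (c - 1) t

theorem foldA_nonpos (m : Int) (hm : m ≤ 0) :
    ∀ (l : List Int) (ans : Int) (box : List Int),
      (l.foldl (stepA m) (ans, box)).1 = ans := by
  intro l
  induction l with
  | nil => intro ans box; rfl
  | cons a t ih =>
      intro ans box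
      have hne : ((box ++ [a]).length : Int) ≠ m := by
        simp only [List.length_append, List.length_cons, List.length_nil]
        omega
      simp only [List.foldl_cons, stepA, if_neg hne]
      exact ih ans (box ++ [a])

theorem foldA_gspec (m : Int) (mn : Nat) (hmI : m = (mn : Int)) (hmn : 1 ≤ mn) :
    ∀ (l : List Int) (ans : Int) (box : List Int), box.length < mn →
      (l.foldl (stepA m) (ans, box)).1 = ans + gspec m mn (mn - box.length) l := by
  intro l
  induction l with
  | nil => intro ans box _; simp [gspec]
  | cons a t ih =>
      intro ans box hbox
      by_cases h : box.length + 1 = mn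
      · have hc : ((box ++ [a]).length : Int) = m := by
          simp only [List.length_append, List.length_cons, List.length_nil]
          omega
        simp only [List.foldl_cons, stepA, if_pos hc,
          PySem.List.pyGetD_neg_one_append_singleton]
        rw [ih (ans + a * m) [] (by simpa using hmn)]
        have hc1 : mn - box.length = 1 := by omega
        simp [gspec, hc1]
        ring
      · have hc : ((box ++ [a]).length : Int) ≠ m := by
          simp only [List.length_append, List.length_cons, List.length_nil]
          omega
        simp only [List.foldl_cons, stepA, if_neg hc]
        rw [ih ans (box ++ [a]) (by simp; omega)]
        have h2 : ¬ (mn - box.length ≤ 1) := by omega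
        have hrhs : gspec m mn (mn - box.length) (a :: t)
            = gspec m mn (mn - box.length - 1) t := by
          simp only [gspec, if_neg h2]
        rw [hrhs]
        simp only [List.length_append, List.length_cons, List.length_nil]
        rw [Nat.sub_sub]

theorem gspec_step (m : Int) (mn : Nat) :
    ∀ (l : List Int) (c : Nat), 1 ≤ c →
      gspec m mn c l =
        if l.length < c then 0
        else l.getD (c - 1) 0 * m + gspec m mn mn (l.drop c) := by
  intro l
  induction l with
  | nil =>
      intro c hc
      rw [if_pos (by simp; omega)]
      rfl
  | cons a t ih =>
      intro c hc
      by_cases h1 : c = 1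
      · subst h1; simp [gspec]
      · obtain ⟨c', rfl⟩ : ∃ c', c = c' + 2 := ⟨c - 2, by omega⟩
        have : gspec m mn (c' + 2) (a :: t) = gspec m mn (c' + 1) t := by
          simp [gspec]
        rw [this, ih (c' + 1) (by omega)]
        by_cases h2 : t.length < c' + 1
        · rw [if_pos h2, if_pos (by simp only [List.length_cons]; omega)]
        · rw [if_neg h2, if_neg (by simp only [List.length_cons]; omega)]
          have hd : (a :: t).drop (c' + 2) = t.drop (c' + 1) := by
            simp [List.drop_succ_cons]
          have hg : (a :: t).getD (c' + 2 - 1) 0 = t.getD (c' + 1 - 1) 0 := by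
            simp
          rw [hd, hg]

theorem gspec_sum (m : Int) (mn : Nat) (hmn : 1 ≤ mn) :
    ∀ (n : Nat) (l : List Int), l.length ≤ n →
      gspec m mn mn l =
        m * ((List.range (l.length / mn)).map
              (fun j => l.getD ((j + 1) * mn - 1) 0)).sum := by
  intro n
  induction n with
  | zero =>
      intro l hl
      have h0 : l.length = 0 := by omega
      rw [gspec_step m mn l mn hmn, if_pos (by omega)]
      simp [h0, Nat.zero_div]
  | succ n ih =>
      intro l hl
      by_cases hsmall : l.length < mn
      · rw [gspec_step m mn l mn hmn, if_pos hsmall]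
        rw [Nat.div_eq_of_lt hsmall]
        simp
      · replace hsmall : mn ≤ l.length := le_of_not_gt hsmall
        rw [gspec_step m mn l mn hmn, if_neg (by omega)]
        have hdl : (l.drop mn).length = l.length - mn := by simp
        rw [ih (l.drop mn) (by omega)]
        have hq : l.length / mn = (l.length - mn) / mn + 1 := by
          conv_lhs => rw [show l.length = (l.length - mn) + mn by omega]
          rw [Nat.add_div_right _ (by omega)]
        rw [hq, hdl, List.range_succ_eq_map]
        have hgd : ∀ j : Nat,
            (l.drop mn).getD ((j + 1) * mn - 1) 0 = l.getD ((j + 2) * mn - 1) 0 := by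
          intro j
          have h1 : 1 ≤ (j + 1) * mn := Nat.one_le_iff_ne_zero.mpr (by positivity)
          have hidx : mn + ((j + 1) * mn - 1) = (j + 2) * mn - 1 := by
            have : (j + 2) * mn = (j + 1) * mn + mn := by ring
            omega
          simp only [List.getD_eq_getElem?_getD, List.getElem?_drop, hidx]
        simp only [List.map_cons, List.map_map, List.sum_cons]
        have hmap : List.map ((fun j => l.getD ((j + 1) * mn - 1) 0) ∘ Nat.succ)
              (List.range ((l.length - mn) / mn))
            = (List.range ((l.length - mn) / mn)).map
              (fun j => (l.drop mn).getD ((j + 1) * mn - 1) 0) := by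
          apply List.map_congr_left
          intro j _
          simp only [Function.comp_apply, Nat.succ_eq_add_one]
          rw [hgd j]
        rw [hmap]
        have h0 : (0 + 1) * mn - 1 = mn - 1 := by omega
        rw [h0]
        ring

-- ===== VERDICT (by name: the statement is the Claim_ definition above) =====
theorem solution_spec : Claim_equal_solution := by
  intro k m score _
  show solution k m score = solution_alt k m score
  by_cases hm : m ≤ 0
  · simp only [solution, solution_alt, if_pos hm]
    exact foldA_nonpos m hm _ 0 []
  · replace hm : 0 < m := lt_of_not_ge hm
    obtain ⟨mn, hmI⟩ : ∃ mn : Nat, m = (mn : Int) := ⟨m.toNat, by omega⟩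
    have hmn : 1 ≤ mn := by rw [hmI] at hm; exact_mod_cast hm
    simp only [solution, solution_alt, if_neg (not_le.mpr hm)]
    set l := PySem.List.sorted score (fun x => x) true with hl
    rw [show (fun (st : Int × List Int) a =>
      let box := st.2 ++ [a]
      if (box.length : Int) = m then
        (st.1 + PySem.List.pyGetD box (-1) 0 * m, ([] : List Int))
      else (st.1, box)) = stepA m from rfl]
    rw [foldA_gspec m mn hmI hmn l 0 [] (by simpa using hmn)]
    simp only [List.length_nil, Nat.sub_zero, zero_add]
    rw [gspec_sum m mn hmn l.length l le_rfl]
    have hfd : PySem.Int.floordiv (l.length : Int) m = ((l.length / mn : Nat) : Int) := by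
      rw [hmI]; exact PySem.Int.floordiv_natCast _ _
    rw [hfd]
    have hrange : PySem.List.pyRange 1 (((l.length / mn : Nat) : Int) + 1) 1
        = (List.range (l.length / mn)).map (fun k : Nat => 1 + (k : Int)) := by
      have h11 : ((l.length / mn : Nat) : Int) + 1 - 1 = ((l.length / mn : Nat) : Int) := by
        ring
      rw [PySem.List.pyRange_one, h11, Int.toNat_natCast]
    rw [hrange, List.map_map]
    congr 1
    congr 1
    apply List.map_congr_left
    intro j _
    have h1 : 1 ≤ (j + 1) * mn := Nat.one_le_iff_ne_zero.mpr (by positivity)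
    have hidx : (1 + (j : Int)) * m - 1 = (((j + 1) * mn - 1 : Nat) : Int) := by
      rw [hmI]
      push_cast [h1]
      ring
    simp only [Function.comp_apply, hidx, PySem.List.pyGetD_natCast]
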